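-- pv_equiv track=rewrite | github.com/kh277/BOJ | 백준/Gold/33694. 가디언 엔젤 슬라임/가디언 엔젤 슬라임.py | solve
-- ===== SOURCE A (Python) =====
-- import io, math
--
-- def solve(N, X, slime):
--     date = []
--     for i in range(N):
--         curA, curB, curC, curT = slime[i]
--
--         # 최대로 커져도 X보다 작은 경우
--         maxDay = math.ceil(curC/curA)
--         if maxDay*curA < X:
--             continue
--
--         # 슬라임의 크기 구하기
--         startDate = curT + math.ceil(X/curA)
--         endDate = curT + maxDay + (maxDay*curA - X) // curB
--
--         date.append([startDate, +1])
--         date.append([endDate+1, -1])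
--
--     # 스위핑으로 3 이상인 구간 처리
--     date.sort(key= lambda x: (x[0], x[1]))
--     result = 0
--     accSum = 0
--     beforeDay = None
--     for i in range(len(date)):
--         curDay, value = date[i]
--         if beforeDay != None and accSum >= 3:
--             result += curDay - beforeDay
--         accSum += value
--         beforeDay = curDay
--
--     return result
-- ===== SOURCE B (Python) =====
-- import math
--
-- def solve(N, X, slime):
--     # phase 1: same interval derivation as A, kept as separate start/end-boundary lists
--     starts, ends = [], []
--     for i in range(N):
--         a, b, c, t = slime[i]
--         maxDay = math.ceil(c / a)
--         if maxDay * a < X: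
--             continue
--         starts.append(t + math.ceil(X / a))
--         ends.append(t + maxDay + (maxDay * a - X) // b + 1)
--     # phase 2: for each segment between adjacent distinct boundary coordinates,
--     # count its coverage directly: intervals begun at or before it minus intervals
--     # already ended (no event list, no running accumulator across segments)
--     coords = sorted(set(starts) | set(ends))
--     result = 0
--     for cur, nxt in zip(coords, coords[1:]):
--         cover = sum(s <= cur for s in starts) - sum(e <= cur for e in ends)
--         if cover >= 3:
--             result += nxt - cur
--     return result
-- ===== Notes on version B (the rewrite author's own statement) =====
-- stated objective: alternative
-- what changed: The event sweep is replaced by direct per-segment coverage counting: B keeps separate start/end-boundary lists, sorts only the distinct coordinates, and for each adjacent coordinate pair recomputes the coverage from scratch as (#starts <= cur) - (#ends <= cur), with no signed event list and no running accumulator carried across segments.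
import Mathlib
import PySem

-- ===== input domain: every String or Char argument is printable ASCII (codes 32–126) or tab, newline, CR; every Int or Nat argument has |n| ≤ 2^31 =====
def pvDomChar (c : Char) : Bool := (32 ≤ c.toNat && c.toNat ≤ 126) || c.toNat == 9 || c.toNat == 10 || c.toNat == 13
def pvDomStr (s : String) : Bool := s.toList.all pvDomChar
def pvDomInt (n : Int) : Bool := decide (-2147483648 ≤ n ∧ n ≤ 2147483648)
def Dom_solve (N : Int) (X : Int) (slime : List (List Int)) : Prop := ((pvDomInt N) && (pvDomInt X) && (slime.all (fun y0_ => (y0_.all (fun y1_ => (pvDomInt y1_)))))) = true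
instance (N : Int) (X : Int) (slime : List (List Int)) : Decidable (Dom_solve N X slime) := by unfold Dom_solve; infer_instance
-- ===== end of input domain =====

-- B replaces A's accumulator sweep over 2N sorted signed events by direct
-- per-segment coverage counting over the distinct boundary coordinates
-- (objective: alternative algorithm; phase 1's interval derivation is shared).

-- math.ceil(x/y) is ported inline as -(PySem.Int.floordiv (-x) y): the exact
-- integer ceiling. On Dom (|values| ≤ 2^31, divisor ≠ 0) CPython's float
-- division is correctly rounded and cannot cross an integer, so it is exact.

-- ===== PORT A =====
def solve (N : Int) (X : Int) (slime : List (List Int)) : Int :=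
  let date : List (Int × Int) :=
    (PySem.List.pyRange 0 N 1).foldl (fun date i =>
      match PySem.List.pyGetD slime i [] with
      | [curA, curB, curC, curT] =>
        let maxDay := -(PySem.Int.floordiv (-curC) curA)
        if maxDay * curA < X then date
        else
          let startDate := curT + -(PySem.Int.floordiv (-X) curA)
          let endDate := curT + maxDay + PySem.Int.floordiv (maxDay * curA - X) curB
          date ++ [(startDate, 1)] ++ [(endDate + 1, -1)]
      | _ => date) []
  let date := PySem.List.sorted2 date (fun x => x.1) (fun x => x.2)
  (date.foldl (fun (st : Int × Int × Option Int) e =>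
      (match st.2.2 with
       | some b => if st.2.1 ≥ 3 then st.1 + (e.1 - b) else st.1
       | none => st.1,
       st.2.1 + e.2, some e.1)) (0, 0, none)).1

-- ===== PORT B =====
def solve_alt (N : Int) (X : Int) (slime : List (List Int)) : Int :=
  -- phase 1: the pair (starts, ends) of boundary lists
  let p : List Int × List Int :=
    (PySem.List.pyRange 0 N 1).foldl (fun (p : List Int × List Int) i =>
      -- 'a, b, c, t = slime[i]': totalized as an arity check plus indexing
      let row := PySem.List.pyGetD slime i []
      if row.length = 4 then
        let a := row.getD 0 0
        let b := row.getD 1 0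
        let c := row.getD 2 0
        let t := row.getD 3 0
        let maxDay := -(PySem.Int.floordiv (-c) a)
        if maxDay * a < X then p
        else (p.1 ++ [t + -(PySem.Int.floordiv (-X) a)],
              p.2 ++ [t + maxDay + PySem.Int.floordiv (maxDay * a - X) b + 1])
      else p) ([], [])
  -- phase 2: sorted(set(starts) | set(ends)), then per-segment stabbing counts
  let coords := PySem.List.sorted (PySem.Set.union (PySem.Set.ofList p.1) p.2) (fun k => k)
  (coords.zip coords.tail).foldl (fun res q =>
      let cover : Int := ((p.1.countP (fun s => decide (s ≤ q.1)) : Nat) : Int)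
                       - ((p.2.countP (fun e => decide (e ≤ q.1)) : Nat) : Int)
      if cover ≥ 3 then res + (q.2 - q.1) else res) 0

-- ===== PRECONDITION & SPEC =====
-- Pre_ excludes exactly the inputs where Python A raises: N > len(slime)
-- (IndexError), a touched row not of length 4 (ValueError on unpacking),
-- curA = 0 (ZeroDivisionError), and curB = 0 reached past the continue guard
-- (ZeroDivisionError).  The two ports in fact agree on all inputs, so the
-- equivalence proof below does not need Pre_.
def Pre_solve (N : Int) (X : Int) (slime : List (List Int)) : Prop :=
  N ≤ (slime.length : Int) ∧
  ((slime.take N.toNat).all (fun row =>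
    row.length == 4 && row.getD 0 0 != 0 &&
      (row.getD 1 0 != 0 ||
       decide (-(PySem.Int.floordiv (-(row.getD 2 0)) (row.getD 0 0)) * row.getD 0 0 < X)))) = true
instance (N : Int) (X : Int) (slime : List (List Int)) : Decidable (Pre_solve N X slime) := by unfold Pre_solve; infer_instance

def pvWitness_solve : Int × Int × List (List Int) :=
  (3, 5, [[1, 1, 10, 0], [1, 1, 10, 0], [2, 1, 9, 1]])

def Spec_solve (N : Int) (X : Int) (slime : List (List Int)) (out : Int) : Prop := out = solve_alt N X slime
instance (N : Int) (X : Int) (slime : List (List Int)) (out : Int) : Decidable (Spec_solve N X slime out) := by unfold Spec_solve; infer_instance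

-- ===== CLAIM (what is proved, stated in full; the proofs are below) =====
def Claim_equal_solve : Prop := ∀ (N : Int) (X : Int) (slime : List (List Int)), Dom_solve N X slime → Pre_solve N X slime → Spec_solve N X slime (solve N X slime)

-- ===== LEMMAS AND PROOFS =====

-- the two events a kept row contributes (empty for a skipped or malformed row)
def rowEvents (X : Int) (row : List Int) : List (Int × Int) :=
  match row with
  | [a, b, c, t] =>
    let maxDay := -(PySem.Int.floordiv (-c) a)
    if maxDay * a < X then []
    else
      [(t + -(PySem.Int.floordiv (-X) a), 1),
       (t + maxDay + PySem.Int.floordiv (maxDay * a - X) b + 1, -1)]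
  | _ => []

-- the same row's contribution to B's two boundary lists
def rowStarts (X : Int) (row : List Int) : List Int :=
  match row with
  | [a, _, c, t] =>
    let maxDay := -(PySem.Int.floordiv (-c) a)
    if maxDay * a < X then [] else [t + -(PySem.Int.floordiv (-X) a)]
  | _ => []

def rowEnds (X : Int) (row : List Int) : List Int :=
  match row with
  | [a, b, c, t] =>
    let maxDay := -(PySem.Int.floordiv (-c) a)
    if maxDay * a < X then []
    else [t + maxDay + PySem.Int.floordiv (maxDay * a - X) b + 1]
  | _ => []

def evsOf (N : Int) (X : Int) (slime : List (List Int)) : List (Int × Int) :=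
  (PySem.List.pyRange 0 N 1).flatMap (fun i => rowEvents X (PySem.List.pyGetD slime i []))

def startsOf (N : Int) (X : Int) (slime : List (List Int)) : List Int :=
  (PySem.List.pyRange 0 N 1).flatMap (fun i => rowStarts X (PySem.List.pyGetD slime i []))

def endsOf (N : Int) (X : Int) (slime : List (List Int)) : List Int :=
  (PySem.List.pyRange 0 N 1).flatMap (fun i => rowEnds X (PySem.List.pyGetD slime i []))

-- total delta contributed at coordinate k
def sumAt (l : List (Int × Int)) (k : Int) : Int :=
  ((l.filter (fun p => p.1 == k)).map Prod.snd).sum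

-- total delta of the events with coordinate ≤ c
def sumLE (l : List (Int × Int)) (c : Int) : Int :=
  ((l.filter (fun p => decide (p.1 ≤ c))).map Prod.snd).sum

-- how many elements of a coordinate list are ≤ c (B's stabbing half-counts)
def cntLE (l : List Int) (c : Int) : Int :=
  ((l.countP (fun x => decide (x ≤ c)) : Nat) : Int)

-- merge consecutive equal coordinates of a (coordinate-sorted) event list
def groupSum : List (Int × Int) → List (Int × Int)
  | [] => []
  | (d, v) :: rest =>
    match groupSum rest with
    | (d', v') :: gs => if d = d' then (d, v + v') :: gs else (d, v) :: (d', v') :: gs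
    | [] => [(d, v)]

-- B's prefix-sum view, as a recursion over (coordinate, merged delta) pairs
def bRun : Int → List (Int × Int) → Int
  | _, [] => 0
  | _, [_] => 0
  | cover, (k1, v1) :: (k2, v2) :: rest =>
    (if cover + v1 ≥ 3 then k2 - k1 else 0) + bRun (cover + v1) ((k2, v2) :: rest)

-- A's sweep, as a recursion (acc, beforeDay, remaining events) returning the result
def sweepA : Int → Option Int → List (Int × Int) → Int
  | _, _, [] => 0
  | acc, none, e :: t => sweepA (acc + e.2) (some e.1) t
  | acc, some b, e :: t => (if acc ≥ 3 then e.1 - b else 0) + sweepA (acc + e.2) (some e.1) t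

lemma sumAt_nil (k : Int) : sumAt [] k = 0 := rfl

lemma groupSum_cons (d v : Int) (rest : List (Int × Int)) :
    groupSum ((d, v) :: rest) = match groupSum rest with
      | (d', v') :: gs => if d = d' then (d, v + v') :: gs else (d, v) :: (d', v') :: gs
      | [] => [(d, v)] := by
  simp only [groupSum]

lemma sumAt_cons (p : Int × Int) (l : List (Int × Int)) (k : Int) :
    sumAt (p :: l) k = (if p.1 = k then p.2 else 0) + sumAt l k := by
  by_cases h : p.1 = k <;> simp [sumAt, h]

lemma sumAt_of_not_mem (l : List (Int × Int)) (k : Int) (h : k ∉ l.map Prod.fst) :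
    sumAt l k = 0 := by
  induction l with
  | nil => rfl
  | cons p t ih =>
    simp only [List.map_cons, List.mem_cons, not_or] at h
    rw [sumAt_cons, if_neg (fun hh => h.1 hh.symm), ih h.2, add_zero]

lemma sumAt_perm {l l' : List (Int × Int)} (h : l.Perm l') (k : Int) :
    sumAt l k = sumAt l' k := by
  unfold sumAt
  exact List.Perm.sum_eq (List.Perm.map _ (List.Perm.filter _ h))

lemma groupSum_sumAt (l : List (Int × Int)) (k : Int) :
    sumAt (groupSum l) k = sumAt l k := by
  induction l with
  | nil => rfl
  | cons p t ih =>
    obtain ⟨d, v⟩ := p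
    cases hgt : groupSum t with
    | nil =>
      rw [hgt] at ih
      simp only [groupSum, hgt, sumAt_cons, sumAt_nil] at *
      omega
    | cons q gs =>
      obtain ⟨d', v'⟩ := q
      rw [hgt, sumAt_cons] at ih
      by_cases hdd : d = d'
      · simp only [groupSum, hgt, if_pos hdd]
        subst hdd
        rw [sumAt_cons, sumAt_cons, ← ih]
        split_ifs <;> ring
      · simp only [groupSum, hgt, if_neg hdd]
        rw [sumAt_cons, sumAt_cons, sumAt_cons, ← ih]

lemma groupSum_mem (l : List (Int × Int)) (k : Int) :
    k ∈ (groupSum l).map Prod.fst ↔ k ∈ l.map Prod.fst := by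
  induction l with
  | nil => simp [groupSum]
  | cons p t ih =>
    obtain ⟨d, v⟩ := p
    cases hgt : groupSum t with
    | nil =>
      rw [hgt] at ih
      simp only [groupSum, hgt]
      simp at ih ⊢
      tauto
    | cons q gs =>
      obtain ⟨d', v'⟩ := q
      rw [hgt] at ih
      by_cases hdd : d = d'
      · simp only [groupSum, hgt, if_pos hdd]
        simp at ih ⊢
        subst hdd
        tauto
      · simp only [groupSum, hgt, if_neg hdd]
        simp at ih ⊢
        tauto

lemma groupSum_head (d v : Int) (t : List (Int × Int)) :
    ∃ V gs, groupSum ((d, v) :: t) = (d, V) :: gs := by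
  cases hgt : groupSum t with
  | nil => exact ⟨v, [], by simp [groupSum, hgt]⟩
  | cons q gs =>
    obtain ⟨d', v'⟩ := q
    by_cases hdd : d = d'
    · exact ⟨v + v', gs, by simp [groupSum, hgt, if_pos hdd]⟩
    · exact ⟨v, (d', v') :: gs, by simp [groupSum, hgt, if_neg hdd]⟩

lemma groupSum_pairwise (l : List (Int × Int))
    (h : l.Pairwise (fun a b => a.1 ≤ b.1)) :
    (groupSum l).Pairwise (fun a b => a.1 < b.1) := by
  induction l with
  | nil => exact List.Pairwise.nil
  | cons p t ih =>
    obtain ⟨d, v⟩ := p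
    rw [List.pairwise_cons] at h
    obtain ⟨hd, ht⟩ := h
    have iht := ih ht
    cases hgt : groupSum t with
    | nil => simp [groupSum, hgt]
    | cons q gs =>
      obtain ⟨d', v'⟩ := q
      rw [hgt] at iht
      have hd' : d ≤ d' := by
        have hmem : d' ∈ t.map Prod.fst := (groupSum_mem t d').mp (by rw [hgt]; simp)
        obtain ⟨b, hb, hfst⟩ := List.mem_map.mp hmem
        exact hfst ▸ hd b hb
      by_cases hdd : d = d'
      · simp only [groupSum, hgt, if_pos hdd]
        rw [List.pairwise_cons] at iht
        rw [List.pairwise_cons]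
        refine ⟨fun x hx => ?_, iht.2⟩
        show d < x.1
        rw [hdd]
        exact iht.1 x hx
      · simp only [groupSum, hgt, if_neg hdd]
        rw [List.pairwise_cons]
        refine ⟨fun x hx => ?_, iht⟩
        rcases List.mem_cons.mp hx with hx | hx
        · rw [hx]; exact lt_of_le_of_ne hd' hdd
        · exact lt_trans (lt_of_le_of_ne hd' hdd) ((List.pairwise_cons.mp iht).1 x hx)

-- two assoc lists with strictly increasing keys, the same key set and the same
-- per-key sums are equal
lemma pairs_ext : ∀ (p q : List (Int × Int)),
    p.Pairwise (fun a b => a.1 < b.1) → q.Pairwise (fun a b => a.1 < b.1) →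
    (∀ k, k ∈ p.map Prod.fst ↔ k ∈ q.map Prod.fst) →
    (∀ k, sumAt p k = sumAt q k) → p = q := by
  intro p
  induction p with
  | nil =>
    intro q _ _ hm _
    cases q with
    | nil => rfl
    | cons e q' =>
      exact absurd ((hm e.1).mpr (by simp)) (by simp)
  | cons e p' ih =>
    intro q hp hq hm hs
    cases q with
    | nil => exact absurd ((hm e.1).mp (by simp)) (by simp)
    | cons f q' =>
      obtain ⟨k, v⟩ := e
      obtain ⟨l, w⟩ := f
      rw [List.pairwise_cons] at hp hq
      have hknp : k ∉ p'.map Prod.fst := by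
        intro hmem
        obtain ⟨b, hb, hfst⟩ := List.mem_map.mp hmem
        exact absurd (hfst ▸ hp.1 b hb) (lt_irrefl k)
      have hlnq : l ∉ q'.map Prod.fst := by
        intro hmem
        obtain ⟨b, hb, hfst⟩ := List.mem_map.mp hmem
        exact absurd (hfst ▸ hq.1 b hb) (lt_irrefl l)
      have hkl : k = l := by
        by_contra hne
        have hkq : k ∈ ((l, w) :: q').map Prod.fst := (hm k).mp (by simp)
        rw [List.map_cons] at hkq
        have hk : k ∈ q'.map Prod.fst := by
          rcases List.mem_cons.mp hkq with h | h
          · exact absurd h hne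
          · exact h
        have hlp : l ∈ ((k, v) :: p').map Prod.fst := (hm l).mpr (by simp)
        rw [List.map_cons] at hlp
        have hl : l ∈ p'.map Prod.fst := by
          rcases List.mem_cons.mp hlp with h | h
          · exact absurd h.symm hne
          · exact h
        obtain ⟨b, hb, hfst⟩ := List.mem_map.mp hk
        have h1 : l < k := hfst ▸ hq.1 b hb
        obtain ⟨b', hb', hfst'⟩ := List.mem_map.mp hl
        have h2 : k < l := hfst' ▸ hp.1 b' hb'
        omega
      subst hkl
      have hvw : v = w := by
        have h1 := hs k
        rw [sumAt_cons, sumAt_cons, if_pos rfl, if_pos rfl,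
            sumAt_of_not_mem _ _ hknp, sumAt_of_not_mem _ _ hlnq] at h1
        simpa using h1
      subst hvw
      have htl : p' = q' := by
        apply ih q' hp.2 hq.2
        · intro k'
          constructor
          · intro hk'
            have hne : k' ≠ k := fun h => hknp (h ▸ hk')
            have hin : k' ∈ ((k, v) :: q').map Prod.fst :=
              (hm k').mp (by rw [List.map_cons]; exact List.mem_cons_of_mem _ hk')
            rw [List.map_cons] at hin
            rcases List.mem_cons.mp hin with h | h
            · exact absurd h hne
            · exact h
          · intro hk'
            have hne : k' ≠ k := fun h => hlnq (h ▸ hk')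
            have hin : k' ∈ ((k, v) :: p').map Prod.fst :=
              (hm k').mpr (by rw [List.map_cons]; exact List.mem_cons_of_mem _ hk')
            rw [List.map_cons] at hin
            rcases List.mem_cons.mp hin with h | h
            · exact absurd h hne
            · exact h
        · intro k'
          by_cases hk' : k' = k
          · subst hk'
            rw [sumAt_of_not_mem _ _ hknp, sumAt_of_not_mem _ _ hlnq]
          · have h1 := hs k'
            rw [sumAt_cons, sumAt_cons, if_neg (fun h => hk' h.symm)] at h1
            omega
      rw [htl]

-- ----- insertion-sort order facts (sorted2 by first key) -----

lemma insertBy_pairwise {α : Type} (before : α → α → Bool)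
    (hasym : ∀ a b, before a b = true → before b a = false)
    (htr : ∀ a b c, before a b = true → before c b = false → before c a = false)
    (x : α) : ∀ (ys : List α), ys.Pairwise (fun a b => before b a = false) →
    (PySem.List.insertBy before x ys).Pairwise (fun a b => before b a = false) := by
  intro ys
  induction ys with
  | nil => intro _; simp [PySem.List.insertBy]
  | cons y t ih =>
    intro h
    rw [List.pairwise_cons] at h
    rw [show PySem.List.insertBy before x (y :: t)
        = if before x y = true then x :: y :: t else y :: PySem.List.insertBy before x t from rfl]
    split_ifs with hxy
    · rw [List.pairwise_cons]
      constructor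
      · intro z hz
        rcases List.mem_cons.mp hz with hz | hz
        · rw [hz]; exact hasym x y hxy
        · exact htr x y z hxy (h.1 z hz)
      · exact List.pairwise_cons.mpr h
    · rw [List.pairwise_cons]
      constructor
      · intro z hz
        rcases (PySem.List.insertBy_mem_iff before x z t).mp hz with hz | hz
        · rw [hz]; exact Bool.not_eq_true _ ▸ hxy
        · exact h.1 z hz
      · exact ih h.2

lemma foldl_insertBy_pairwise {α : Type} (before : α → α → Bool)
    (hasym : ∀ a b, before a b = true → before b a = false)
    (htr : ∀ a b c, before a b = true → before c b = false → before c a = false) :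
    ∀ (xs acc : List α), acc.Pairwise (fun a b => before b a = false) →
    (xs.foldl (fun acc x => PySem.List.insertBy before x acc) acc).Pairwise
      (fun a b => before b a = false) := by
  intro xs
  induction xs with
  | nil => intro acc h; exact h
  | cons x t ih =>
    intro acc h
    exact ih _ (insertBy_pairwise before hasym htr x acc h)

lemma sorted2_pairwise_fst (l : List (Int × Int)) :
    (PySem.List.sorted2 l (fun x => x.1) (fun x => x.2)).Pairwise
      (fun a b => a.1 ≤ b.1) := by
  have key : (l.foldl (fun acc x => PySem.List.insertBy
      (fun a b : Int × Int => decide (a.1 < b.1) || (!decide (b.1 < a.1) && decide (a.2 < b.2)))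
      x acc) []).Pairwise
      (fun a b : Int × Int =>
        (decide (b.1 < a.1) || (!decide (a.1 < b.1) && decide (b.2 < a.2))) = false) := by
    apply foldl_insertBy_pairwise
    · intro a b hab
      simp at hab ⊢
      omega
    · intro a b c hab hcb
      simp at hab hcb ⊢
      omega
    · exact List.Pairwise.nil
  have key2 : (l.foldl (fun acc x => PySem.List.insertBy
      (fun a b : Int × Int => decide (a.1 < b.1) || (!decide (b.1 < a.1) && decide (a.2 < b.2)))
      x acc) []).Pairwise (fun a b : Int × Int => a.1 ≤ b.1) := by
    refine List.Pairwise.imp ?_ key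
    intro a b hab
    simp at hab
    omega
  exact key2

-- ----- phase-1 characterizations -----

lemma solveA_date (N X : Int) (slime : List (List Int)) :
    ((PySem.List.pyRange 0 N 1).foldl (fun date i =>
      match PySem.List.pyGetD slime i [] with
      | [curA, curB, curC, curT] =>
        let maxDay := -(PySem.Int.floordiv (-curC) curA)
        if maxDay * curA < X then date
        else
          let startDate := curT + -(PySem.Int.floordiv (-X) curA)
          let endDate := curT + maxDay + PySem.Int.floordiv (maxDay * curA - X) curB
          date ++ [(startDate, 1)] ++ [(endDate + 1, -1)]
      | _ => date) ([] : List (Int × Int))) = evsOf N X slime := by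
  have hbody : ∀ (date : List (Int × Int)) (i : Int),
      (match PySem.List.pyGetD slime i [] with
      | [curA, curB, curC, curT] =>
        let maxDay := -(PySem.Int.floordiv (-curC) curA)
        if maxDay * curA < X then date
        else
          let startDate := curT + -(PySem.Int.floordiv (-X) curA)
          let endDate := curT + maxDay + PySem.Int.floordiv (maxDay * curA - X) curB
          date ++ [(startDate, 1)] ++ [(endDate + 1, -1)]
      | _ => date) = date ++ rowEvents X (PySem.List.pyGetD slime i []) := by
    intro date i
    rcases hrow : PySem.List.pyGetD slime i [] with _ | ⟨a, _ | ⟨b, _ | ⟨c, _ | ⟨t, _ | ⟨u, rest⟩⟩⟩⟩⟩ <;>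
      simp only [rowEvents] <;>
      first
      | (split_ifs <;> simp)
      | simp
  calc ((PySem.List.pyRange 0 N 1).foldl (fun date i =>
      match PySem.List.pyGetD slime i [] with
      | [curA, curB, curC, curT] =>
        let maxDay := -(PySem.Int.floordiv (-curC) curA)
        if maxDay * curA < X then date
        else
          let startDate := curT + -(PySem.Int.floordiv (-X) curA)
          let endDate := curT + maxDay + PySem.Int.floordiv (maxDay * curA - X) curB
          date ++ [(startDate, 1)] ++ [(endDate + 1, -1)]
      | _ => date) ([] : List (Int × Int)))
      = (PySem.List.pyRange 0 N 1).foldl (fun date i =>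
          date ++ rowEvents X (PySem.List.pyGetD slime i [])) [] := by
        apply PySem.List.foldl_congr_mem
        intro acc x _
        exact hbody acc x
    _ = evsOf N X slime := by
        rw [PySem.List.foldl_append_eq_flatMap]
        simp [evsOf]

-- a fold appending to both components of a pair is a pair of flatMaps
lemma foldl_pair_append {α : Type} (g1 g2 : α → List Int) :
    ∀ (l : List α) (p : List Int × List Int),
    l.foldl (fun p x => (p.1 ++ g1 x, p.2 ++ g2 x)) p
      = (p.1 ++ l.flatMap g1, p.2 ++ l.flatMap g2) := by
  intro l
  induction l with
  | nil => intro p; simp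
  | cons x t ih =>
    intro p
    rw [List.foldl_cons, ih]
    simp

lemma solveB_lists (N X : Int) (slime : List (List Int)) :
    ((PySem.List.pyRange 0 N 1).foldl (fun (p : List Int × List Int) i =>
      let row := PySem.List.pyGetD slime i []
      if row.length = 4 then
        let a := row.getD 0 0
        let b := row.getD 1 0
        let c := row.getD 2 0
        let t := row.getD 3 0
        let maxDay := -(PySem.Int.floordiv (-c) a)
        if maxDay * a < X then p
        else (p.1 ++ [t + -(PySem.Int.floordiv (-X) a)],
              p.2 ++ [t + maxDay + PySem.Int.floordiv (maxDay * a - X) b + 1])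
      else p) (([], []) : List Int × List Int))
    = (startsOf N X slime, endsOf N X slime) := by
  have hbody : ∀ (p : List Int × List Int) (i : Int),
      (let row := PySem.List.pyGetD slime i []
      if row.length = 4 then
        let a := row.getD 0 0
        let b := row.getD 1 0
        let c := row.getD 2 0
        let t := row.getD 3 0
        let maxDay := -(PySem.Int.floordiv (-c) a)
        if maxDay * a < X then p
        else (p.1 ++ [t + -(PySem.Int.floordiv (-X) a)],
              p.2 ++ [t + maxDay + PySem.Int.floordiv (maxDay * a - X) b + 1])
      else p)
      = (p.1 ++ rowStarts X (PySem.List.pyGetD slime i []),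
         p.2 ++ rowEnds X (PySem.List.pyGetD slime i [])) := by
    intro p i
    rcases hrow : PySem.List.pyGetD slime i [] with _ | ⟨a, _ | ⟨b, _ | ⟨c, _ | ⟨t, _ | ⟨u, rest⟩⟩⟩⟩⟩ <;>
      simp only [rowStarts, rowEnds] <;>
      first
      | (norm_num [List.getD]; split_ifs <;> simp)
      | simp
  calc _ = (PySem.List.pyRange 0 N 1).foldl (fun (p : List Int × List Int) i =>
          (p.1 ++ rowStarts X (PySem.List.pyGetD slime i []),
           p.2 ++ rowEnds X (PySem.List.pyGetD slime i []))) ([], []) := by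
        apply PySem.List.foldl_congr_mem
        intro acc x _
        exact hbody acc x
    _ = _ := by
        rw [foldl_pair_append]
        simp [startsOf, endsOf]

-- ----- counting lemmas -----

lemma cntLE_append (l1 l2 : List Int) (c : Int) :
    cntLE (l1 ++ l2) c = cntLE l1 c + cntLE l2 c := by
  simp [cntLE, List.countP_append]

lemma sumLE_nil (c : Int) : sumLE [] c = 0 := rfl

lemma sumLE_append (l1 l2 : List (Int × Int)) (c : Int) :
    sumLE (l1 ++ l2) c = sumLE l1 c + sumLE l2 c := by
  simp [sumLE, List.filter_append]

-- the stabbing count of one row equals its event-delta sum at ≤ c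
lemma row_sumLE (X : Int) (row : List Int) (c : Int) :
    sumLE (rowEvents X row) c = cntLE (rowStarts X row) c - cntLE (rowEnds X row) c := by
  rcases row with _ | ⟨a, _ | ⟨b, _ | ⟨cc, _ | ⟨t, _ | ⟨u, rest⟩⟩⟩⟩⟩ <;>
    simp only [rowEvents, rowStarts, rowEnds] <;>
    (try split_ifs) <;>
    simp [sumLE, cntLE, List.countP_cons, List.filter_cons] <;>
    split_ifs <;> simp

lemma evs_sumLE (N X : Int) (slime : List (List Int)) (c : Int) :
    sumLE (evsOf N X slime) c
      = cntLE (startsOf N X slime) c - cntLE (endsOf N X slime) c := by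
  unfold evsOf startsOf endsOf
  induction PySem.List.pyRange 0 N 1 with
  | nil => simp [sumLE, cntLE]
  | cons i t ih =>
    simp only [List.flatMap_cons, sumLE_append, cntLE_append, ih, row_sumLE]
    ring

-- per-row coordinates: events' first components = starts ++ ends
lemma row_fst (X : Int) (row : List Int) :
    (rowEvents X row).map Prod.fst = rowStarts X row ++ rowEnds X row := by
  rcases row with _ | ⟨a, _ | ⟨b, _ | ⟨cc, _ | ⟨t, _ | ⟨u, rest⟩⟩⟩⟩⟩ <;>
    simp only [rowEvents, rowStarts, rowEnds] <;>
    first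
    | (split_ifs <;> simp)
    | rfl

lemma mem_evs_fst_iff (N X : Int) (slime : List (List Int)) (d : Int) :
    d ∈ (evsOf N X slime).map Prod.fst ↔ d ∈ startsOf N X slime ++ endsOf N X slime := by
  unfold evsOf startsOf endsOf
  simp only [List.map_flatMap, row_fst, List.mem_append, List.mem_flatMap,
    and_or_left, exists_or]

-- sum of a one-point indicator over a duplicate-free list
lemma sum_indicator (d v : Int) :
    ∀ (l : List Int), l.Nodup →
    (l.map (fun k => if d = k then v else 0)).sum = if d ∈ l then v else 0 := by
  intro l
  induction l with
  | nil => intro _; simp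
  | cons x t ih =>
    intro hnd
    rw [List.nodup_cons] at hnd
    rw [List.map_cons, List.sum_cons, ih hnd.2]
    by_cases hdx : d = x
    · subst hdx
      simp [hnd.1]
    · simp [hdx, List.mem_cons]

-- the per-key sums over the distinct keys ≤ c add up to sumLE
lemma filterSum_eq_sumLE (c : Int) :
    ∀ (l : List (Int × Int)) (ks : List Int), ks.Nodup →
    (∀ d, d ∈ l.map Prod.fst → d ∈ ks) →
    ((ks.filter (fun k => decide (k ≤ c))).map (fun k => sumAt l k)).sum = sumLE l c := by
  intro l
  induction l with
  | nil =>
    intro ks _ _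
    rw [sumLE_nil]
    have : ∀ k ∈ ks.filter (fun k => decide (k ≤ c)), sumAt [] k = 0 := fun k _ => rfl
    rw [List.map_congr_left (fun k hk => this k hk)]
    simp
  | cons p t ih =>
    intro ks hnd hmem
    obtain ⟨d, v⟩ := p
    have hd : d ∈ ks := hmem d (by simp)
    have hsplit : ((ks.filter (fun k => decide (k ≤ c))).map (fun k => sumAt ((d, v) :: t) k)).sum
        = ((ks.filter (fun k => decide (k ≤ c))).map (fun k => if d = k then v else 0)).sum
          + ((ks.filter (fun k => decide (k ≤ c))).map (fun k => sumAt t k)).sum := by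
      rw [← List.sum_map_add]
      apply congrArg
      apply List.map_congr_left
      intro k _
      rw [sumAt_cons]
    rw [hsplit, ih ks hnd (fun d' hd' => hmem d' (by simp [hd']))]
    rw [sum_indicator d v _ (List.Nodup.filter _ hnd)]
    have hiff : d ∈ ks.filter (fun k => decide (k ≤ c)) ↔ d ≤ c := by
      simp [List.mem_filter, hd]
    have hcons : sumLE ((d, v) :: t) c = (if d ≤ c then v else 0) + sumLE t c := by
      by_cases hdc : d ≤ c <;> simp [sumLE, hdc]
    rw [hcons]
    by_cases hdc : d ≤ c
    · rw [if_pos (hiff.mpr hdc), if_pos hdc]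
    · rw [if_neg (fun h => hdc (hiff.mp h)), if_neg hdc]

-- B's zip-fold with absolute per-coordinate coverage equals the running bRun
lemma bRun_eq_zipfold (g : Int → Int) :
    ∀ (ks : List Int), ks.Pairwise (· < ·) → ∀ (acc res : Int),
    (ks.zip ks.tail).foldl (fun r q =>
        if acc + ((ks.filter (fun k => decide (k ≤ q.1))).map g).sum ≥ 3
        then r + (q.2 - q.1) else r) res
      = res + bRun acc (ks.map (fun k => (k, g k))) := by
  intro ks
  induction ks with
  | nil => intro _ acc res; simp [bRun]
  | cons k1 rest ih =>
    intro hp acc res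
    rw [List.pairwise_cons] at hp
    cases rest with
    | nil => simp [bRun]
    | cons k2 t =>
      have hk1 : k1 < k2 := hp.1 k2 (by simp)
      have hfilter1 : (k1 :: k2 :: t).filter (fun k => decide (k ≤ k1)) = [k1] := by
        rw [List.filter_cons, if_pos (by simp)]
        have : (k2 :: t).filter (fun k => decide (k ≤ k1)) = [] := by
          rw [List.filter_eq_nil_iff]
          intro x hx
          have : k1 < x := hp.1 x hx
          simp; omega
        rw [this]
      have hstep : ∀ (q : Int × Int), q ∈ (k2 :: t).zip ((k2 :: t).tail) →
          ((k1 :: k2 :: t).filter (fun k => decide (k ≤ q.1))).map g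
            = g k1 :: (((k2 :: t).filter (fun k => decide (k ≤ q.1))).map g) := by
        intro q hq
        have hq1 : q.1 ∈ k2 :: t := by
          obtain ⟨a, b⟩ := q
          exact (List.of_mem_zip hq).1
        have : k1 ≤ q.1 := le_of_lt (hp.1 _ hq1)
        rw [List.filter_cons, if_pos (by simpa using this), List.map_cons]
      show ((( k1, k2) :: (k2 :: t).zip ((k2 :: t).tail)).foldl _ res) = _
      rw [List.foldl_cons]
      have hres1 : (if acc + (((k1 :: k2 :: t).filter (fun k => decide (k ≤ (k1, k2).1))).map g).sum ≥ 3
          then res + ((k1, k2).2 - (k1, k2).1) else res)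
          = if acc + g k1 ≥ 3 then res + (k2 - k1) else res := by
        rw [hfilter1]
        simp
      rw [hres1]
      have hcongr : ((k2 :: t).zip ((k2 :: t).tail)).foldl (fun r q =>
          if acc + (((k1 :: k2 :: t).filter (fun k => decide (k ≤ q.1))).map g).sum ≥ 3
          then r + (q.2 - q.1) else r) (if acc + g k1 ≥ 3 then res + (k2 - k1) else res)
          = ((k2 :: t).zip ((k2 :: t).tail)).foldl (fun r q =>
          if (acc + g k1) + (((k2 :: t).filter (fun k => decide (k ≤ q.1))).map g).sum ≥ 3
          then r + (q.2 - q.1) else r) (if acc + g k1 ≥ 3 then res + (k2 - k1) else res) := by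
        apply PySem.List.foldl_congr_mem
        intro r q hq
        rw [hstep q hq]
        rw [List.sum_cons]
        have : acc + (g k1 + (((k2 :: t).filter (fun k => decide (k ≤ q.1))).map g).sum)
            = (acc + g k1) + (((k2 :: t).filter (fun k => decide (k ≤ q.1))).map g).sum := by ring
        rw [this]
      rw [hcongr, ih hp.2 (acc + g k1) (if acc + g k1 ≥ 3 then res + (k2 - k1) else res)]
      simp only [List.map_cons, bRun]
      split_ifs <;> ring

-- A's fold computes sweepA
lemma aFold_eq : ∀ (l : List (Int × Int)) (res acc : Int) (bd : Option Int),
    (l.foldl (fun (st : Int × Int × Option Int) e =>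
      (match st.2.2 with
       | some b => if st.2.1 ≥ 3 then st.1 + (e.1 - b) else st.1
       | none => st.1,
       st.2.1 + e.2, some e.1)) (res, acc, bd)).1 = res + sweepA acc bd l := by
  intro l
  induction l with
  | nil => intro res acc bd; simp [sweepA]
  | cons e t ih =>
    intro res acc bd
    cases bd with
    | none =>
      rw [List.foldl_cons]
      show (t.foldl _ (res, acc + e.2, some e.1)).1 = res + sweepA (acc + e.2) (some e.1) t
      exact ih res (acc + e.2) (some e.1)
    | some b =>
      rw [List.foldl_cons]
      show (t.foldl _ ((if acc ≥ 3 then res + (e.1 - b) else res), acc + e.2, some e.1)).1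
        = res + ((if acc ≥ 3 then e.1 - b else 0) + sweepA (acc + e.2) (some e.1) t)
      rw [ih]
      split_ifs <;> ring

-- the core sweep equivalence: A's per-event sweep equals bRun over the
-- grouped list, for any coordinate-sorted event list
lemma sweep_group : ∀ (t : List (Int × Int)) (d v acc : Int),
    ((d, v) :: t).Pairwise (fun a b : Int × Int => a.1 ≤ b.1) →
    sweepA (acc + v) (some d) t = bRun acc (groupSum ((d, v) :: t)) := by
  intro t
  induction t with
  | nil =>
    intro d v acc _
    simp [sweepA, groupSum, bRun]
  | cons e t' ih =>
    intro d v acc hp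
    obtain ⟨d2, v2⟩ := e
    rw [List.pairwise_cons] at hp
    have hdd2 : d ≤ d2 := hp.1 (d2, v2) (by simp)
    have hp2 : ((d2, v2) :: t').Pairwise (fun a b : Int × Int => a.1 ≤ b.1) := hp.2
    obtain ⟨V, gs, hG⟩ := groupSum_head d2 v2 t'
    have ihh := ih d2 v2 (acc + v) hp2
    rw [hG] at ihh
    by_cases hdd : d = d2
    · have hgs_whole : groupSum ((d, v) :: (d2, v2) :: t') = (d, v + V) :: gs := by
        rw [groupSum_cons, hG]
        show (if d = d2 then (d, v + V) :: gs else (d, v) :: (d2, V) :: gs) = (d, v + V) :: gs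
        rw [if_pos hdd]
      rw [hgs_whole]
      have hL : sweepA (acc + v) (some d) ((d2, v2) :: t')
          = sweepA (acc + v + v2) (some d2) t' := by
        show (if acc + v ≥ 3 then d2 - d else 0) + sweepA (acc + v + v2) (some d2) t' = _
        rw [hdd]
        split_ifs <;> ring
      rw [hL, ihh]
      cases gs with
      | nil => simp [bRun]
      | cons q gs' =>
        obtain ⟨d3, V3⟩ := q
        show (if acc + v + V ≥ 3 then d3 - d2 else 0) + bRun (acc + v + V) ((d3, V3) :: gs')
          = (if acc + (v + V) ≥ 3 then d3 - d else 0) + bRun (acc + (v + V)) ((d3, V3) :: gs')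
        rw [hdd]
        have hacc : acc + v + V = acc + (v + V) := by ring
        rw [hacc]
    · have hgs_whole : groupSum ((d, v) :: (d2, v2) :: t') = (d, v) :: (d2, V) :: gs := by
        rw [groupSum_cons, hG]
        show (if d = d2 then (d, v + V) :: gs else (d, v) :: (d2, V) :: gs) = (d, v) :: (d2, V) :: gs
        rw [if_neg hdd]
      rw [hgs_whole]
      show (if acc + v ≥ 3 then d2 - d else 0) + sweepA (acc + v + v2) (some d2) t'
        = (if acc + v ≥ 3 then d2 - d else 0) + bRun (acc + v) ((d2, V) :: gs)
      rw [ihh]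

lemma sumAt_map_keys (g : Int → Int) :
    ∀ (ks : List Int) (k : Int), ks.Pairwise (· < ·) →
    sumAt (ks.map (fun j => (j, g j))) k = if k ∈ ks then g k else 0 := by
  intro ks
  induction ks with
  | nil => intro k _; simp [sumAt]
  | cons h t ih =>
    intro k hp
    rw [List.pairwise_cons] at hp
    rw [List.map_cons, sumAt_cons, ih k hp.2]
    by_cases hk : h = k
    · subst hk
      have hnt : h ∉ t := fun hm => absurd (hp.1 h hm) (lt_irrefl h)
      simp [hnt]
    · have hkh : ¬ k = h := fun hh => hk hh.symm
      rw [if_neg hk, zero_add]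
      simp [List.mem_cons, hkh]

-- set(starts) | set(ends) is set(starts ++ ends)
lemma set_union_ofList (s e : List Int) :
    PySem.Set.union (PySem.Set.ofList s) e = PySem.Set.ofList (s ++ e) := by
  rw [PySem.Set.ofList_eq_foldl, PySem.Set.ofList_eq_foldl, List.foldl_append]
  rfl

-- the main equivalence, with no precondition: the two ports agree on all inputs
lemma solve_eq_alt (N X : Int) (slime : List (List Int)) :
    solve N X slime = solve_alt N X slime := by
  simp only [solve, solve_alt]
  rw [solveA_date, solveB_lists]
  set evs := evsOf N X slime with hevs
  set starts := startsOf N X slime with hstarts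
  set ends := endsOf N X slime with hends
  set sevs := PySem.List.sorted2 evs (fun x => x.1) (fun x => x.2) with hsevs
  rw [set_union_ofList]
  set ks := PySem.List.sorted (PySem.Set.ofList (starts ++ ends)) (fun k => k) with hks
  rw [aFold_eq]
  simp only [zero_add]
  have hperm : sevs.Perm evs := PySem.List.sorted2_perm evs _ _ false
  have hsorted : sevs.Pairwise (fun a b : Int × Int => a.1 ≤ b.1) := sorted2_pairwise_fst evs
  have hks_pw : ks.Pairwise (· < ·) := by
    rw [hks]
    exact PySem.List.sorted_ofList_pairwise_lt _
  have hks_nd : ks.Nodup := hks_pw.imp (fun h => ne_of_lt h)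
  have hks_mem : ∀ k, k ∈ ks ↔ k ∈ evs.map Prod.fst := by
    intro k
    rw [hks, PySem.List.mem_sorted, PySem.Set.mem_ofList, ← mem_evs_fst_iff]
  set g : Int → Int := fun k => sumAt evs k with hg
  -- identify the grouped sorted events with ks paired with per-key sums
  have hident : ks.map (fun k => (k, g k)) = groupSum sevs := by
    apply pairs_ext
    · exact List.Pairwise.map _ (by intro a b h; simpa using h) hks_pw
    · exact groupSum_pairwise sevs hsorted
    · intro k
      rw [groupSum_mem]
      have hfst : (ks.map (fun k => (k, g k))).map Prod.fst = ks := by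
        rw [List.map_map]
        show ks.map (fun k => k) = ks
        simp
      rw [hfst, hks_mem]
      constructor
      · intro h
        obtain ⟨p, hp, hf⟩ := List.mem_map.mp h
        exact List.mem_map.mpr ⟨p, hperm.symm.mem_iff.mp hp, hf⟩
      · intro h
        obtain ⟨p, hp, hf⟩ := List.mem_map.mp h
        exact List.mem_map.mpr ⟨p, hperm.mem_iff.mp hp, hf⟩
    · intro k
      rw [sumAt_map_keys _ ks k hks_pw, groupSum_sumAt, sumAt_perm hperm, hg]
      by_cases hm : k ∈ ks
      · rw [if_pos hm]
      · rw [if_neg hm]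
        rw [sumAt_of_not_mem]
        intro hmem
        exact hm ((hks_mem k).mpr hmem)
  -- B's cover at each coordinate is the per-key prefix sum
  have hcover : (ks.zip ks.tail).foldl (fun res q =>
        if (((starts.countP (fun s => decide (s ≤ q.1)) : Nat) : Int)
            - ((ends.countP (fun e => decide (e ≤ q.1)) : Nat) : Int)) ≥ 3
        then res + (q.2 - q.1) else res) 0
      = (ks.zip ks.tail).foldl (fun res q =>
        if (0 : Int) + ((ks.filter (fun k => decide (k ≤ q.1))).map g).sum ≥ 3
        then res + (q.2 - q.1) else res) 0 := by
    apply PySem.List.foldl_congr_mem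
    intro r q _
    have h1 : ((ks.filter (fun k => decide (k ≤ q.1))).map g).sum = sumLE evs q.1 := by
      apply filterSum_eq_sumLE
      · exact hks_nd
      · intro d hd
        exact (hks_mem d).mpr hd
    have h2 : sumLE evs q.1 = cntLE starts q.1 - cntLE ends q.1 := evs_sumLE N X slime q.1
    rw [h1, h2]
    simp [cntLE]
  rw [hcover, bRun_eq_zipfold g ks hks_pw 0 0, hident]
  simp only [zero_add]
  -- and conclude with the sweep equivalence
  cases hse : sevs with
  | nil => simp [sweepA, groupSum, bRun]
  | cons e t =>
    obtain ⟨d, v⟩ := e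
    rw [hse] at hsorted
    have h0 : sweepA 0 none ((d, v) :: t) = sweepA (0 + v) (some d) t := rfl
    rw [h0, sweep_group t d v 0 hsorted]

-- ===== VERDICT (by name: the statement is the Claim_ definition above) =====
theorem solve_spec : Claim_equal_solve := by
  intro N X slime _ _
  unfold Spec_solve
  exact solve_eq_alt N X slime
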